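-- pv_equiv track=rewrite | github.com/2z3ed/Ecom-Watch-Agent-Agent | app/services/discovery.py | _domain_match
-- ===== SOURCE A (Python) =====
-- def _domain_match(domain: str, allowed_domains: list[str]) -> bool:
--     if not allowed_domains:
--         return True
--     for allowed in allowed_domains:
--         allowed = allowed.lower()
--         if domain == allowed or domain.endswith(f".{allowed}"):
--             return True
--     return False
-- ===== SOURCE B (Python) =====
-- def _domain_match(domain: str, allowed_domains: list[str]) -> bool:
--     if not allowed_domains:
--         return True
--     suffixes = {a.lower() for a in allowed_domains}
--     if domain in suffixes:
--         return True
--     for i, ch in enumerate(domain):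
--         if ch == '.' and domain[i + 1:] in suffixes:
--             return True
--     return False
-- ===== Notes on version B (the rewrite author's own statement) =====
-- stated objective: alternative
-- what changed: Instead of scanning every allowed domain and testing domain.endswith('.'+allowed), B builds a set of the lowercased allowed domains once and checks the domain itself plus each of its after-a-dot suffixes for membership in that set.
import Mathlib
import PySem

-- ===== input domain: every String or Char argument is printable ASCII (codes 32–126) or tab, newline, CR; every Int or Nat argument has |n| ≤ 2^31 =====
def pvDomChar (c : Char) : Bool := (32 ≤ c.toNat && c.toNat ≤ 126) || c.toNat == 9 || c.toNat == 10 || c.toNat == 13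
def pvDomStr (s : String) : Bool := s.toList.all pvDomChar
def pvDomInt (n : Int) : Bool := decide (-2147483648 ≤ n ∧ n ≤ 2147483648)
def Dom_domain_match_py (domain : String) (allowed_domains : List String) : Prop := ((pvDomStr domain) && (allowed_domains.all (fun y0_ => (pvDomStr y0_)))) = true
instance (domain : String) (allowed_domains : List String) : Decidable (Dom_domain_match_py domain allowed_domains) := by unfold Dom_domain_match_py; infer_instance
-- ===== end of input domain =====

-- B replaces A's scan of allowed domains with endswith by a one-time set of lowercased
-- allowed domains probed with the domain and each of its after-a-dot suffixes (alternative
-- decomposition, same results).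

-- ===== PORT A =====
-- the for-loop with early return, one allowed domain at a time
def domainMatchLoop (d : List Char) : List String → Bool
  | [] => false
  | a :: rest =>
    let al := PySem.Chars.lower a.toList
    if d = al ∨ PySem.Chars.endswith d ('.' :: al) = true then true
    else domainMatchLoop d rest

def domain_match_py (domain : String) (allowed_domains : List String) : Bool :=
  if allowed_domains = [] then true
  else domainMatchLoop domain.toList allowed_domains

-- ===== PORT B =====
def domain_match_py_alt (domain : String) (allowed_domains : List String) : Bool :=
  if allowed_domains = [] then true
  else
    let suffixes : PySem.Set (List Char) :=
      PySem.Set.ofList (allowed_domains.map (fun a => PySem.Chars.lower a.toList))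
    let d := domain.toList
    if PySem.Set.contains suffixes d then true
    else
      (PySem.List.enumerate d 0).any (fun p =>
        p.2 == '.' && PySem.Set.contains suffixes (PySem.List.slice d (some (p.1 + 1)) none))

-- ===== PRECONDITION & SPEC =====
def Spec_domain_match_py (domain : String) (allowed_domains : List String) (out : Bool) : Prop := out = domain_match_py_alt domain allowed_domains
instance (domain : String) (allowed_domains : List String) (out : Bool) : Decidable (Spec_domain_match_py domain allowed_domains out) := by unfold Spec_domain_match_py; infer_instance

-- ===== CLAIM (what is proved, stated in full; the proofs are below) =====
def Claim_equal_domain_match_py : Prop := ∀ (domain : String) (allowed_domains : List String), Dom_domain_match_py domain allowed_domains → Spec_domain_match_py domain allowed_domains (domain_match_py domain allowed_domains)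

-- ===== LEMMAS AND PROOFS =====

-- A's loop is an existential over the allowed domains
lemma domainMatchLoop_eq_true_iff (d : List Char) (l : List String) :
    domainMatchLoop d l = true ↔
      ∃ a ∈ l, d = PySem.Chars.lower a.toList ∨
        PySem.Chars.endswith d ('.' :: PySem.Chars.lower a.toList) = true := by
  induction l with
  | nil => simp [domainMatchLoop]
  | cons a rest ih =>
    simp only [domainMatchLoop]
    split_ifs with h
    · simp only [true_iff]
      exact ⟨a, List.mem_cons_self .., h⟩
    · rw [ih]
      constructor
      · rintro ⟨x, hx, hh⟩; exact ⟨x, List.mem_cons_of_mem _ hx, hh⟩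
      · rintro ⟨x, hx, hh⟩
        rcases List.mem_cons.mp hx with rfl | hx
        · exact absurd hh h
        · exact ⟨x, hx, hh⟩

-- membership in enumerate from 0
lemma mem_enumerate_iff {α : Type} (d : List α) (s : Int) (p : Int × α) :
    p ∈ PySem.List.enumerate d s ↔ ∃ i : Nat, ∃ h : i < d.length, p = (s + i, d[i]) := by
  induction d generalizing s with
  | nil => simp [PySem.List.enumerate_nil]
  | cons x xs ih =>
    rw [PySem.List.enumerate_cons, List.mem_cons, ih]
    constructor
    · rintro (rfl | ⟨i, h, rfl⟩)
      · exact ⟨0, by simp, by simp⟩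
      · refine ⟨i + 1, by simpa using h, ?_⟩
        simp only [List.getElem_cons_succ, Prod.mk.injEq]
        exact ⟨by push_cast; ring, trivial⟩
    · rintro ⟨i, h, rfl⟩
      cases i with
      | zero => left; simp
      | succ i =>
        right
        refine ⟨i, by simpa using h, ?_⟩
        simp only [List.getElem_cons_succ, Prod.mk.injEq]
        exact ⟨by push_cast; ring, trivial⟩

-- '.'-suffix characterisation: d ends with '.'++al iff al is the tail after some dot of d
lemma dot_suffix_iff (d al : List Char) :
    PySem.Chars.endswith d ('.' :: al) = true ↔
      ∃ i : Nat, ∃ h : i < d.length, d[i] = '.' ∧ d.drop (i + 1) = al := by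
  rw [PySem.Chars.endswith_iff]
  constructor
  · rintro ⟨t, rfl⟩
    refine ⟨t.length, by simp, ?_, ?_⟩
    · simp
    · simp [List.drop_append]
  · rintro ⟨i, h, hdot, hdrop⟩
    refine ⟨d.take i, ?_⟩
    have : d = d.take i ++ d[i] :: d.drop (i + 1) := by
      conv_lhs => rw [← List.take_append_drop i d]
      rw [List.drop_eq_getElem_cons h]
    rw [hdot, hdrop] at this
    exact this.symm

lemma drop_eq_slice (d : List Char) (i : Nat) :
    PySem.List.slice d (some ((i : Int) + 1)) none = d.drop (i + 1) := by
  have hc : ((i : Int) + 1) = ((i + 1 : Nat) : Int) := by push_cast; ring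
  rw [hc, PySem.List.slice_from d (by positivity), Int.toNat_natCast]

-- ===== VERDICT (by name: the statement is the Claim_ definition above) =====
theorem domain_match_py_spec : Claim_equal_domain_match_py := by
  intro domain allowed _
  unfold Spec_domain_match_py domain_match_py domain_match_py_alt
  split_ifs with h
  · rfl
  · simp only [Bool.if_true_left, Bool.decide_coe]
    rw [Bool.eq_iff_iff, domainMatchLoop_eq_true_iff, Bool.or_eq_true, List.any_eq_true]
    constructor
    · rintro ⟨a, ha, hcase⟩
      rcases hcase with heq | hend
      · left
        rw [PySem.Set.contains_iff, PySem.Set.mem_ofList, heq]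
        exact List.mem_map_of_mem ha
      · right
        obtain ⟨i, hi, hdot, hdrop⟩ := (dot_suffix_iff _ _).mp hend
        refine ⟨((i : Int), domain.toList[i]), ?_, ?_⟩
        · rw [mem_enumerate_iff]; exact ⟨i, hi, by simp⟩
        · simp only [Bool.and_eq_true, beq_iff_eq]
          refine ⟨hdot, ?_⟩
          rw [PySem.Set.contains_iff, PySem.Set.mem_ofList, drop_eq_slice, hdrop]
          exact List.mem_map_of_mem ha
    · rintro (hmem | ⟨p, hp, hcond⟩)
      · rw [PySem.Set.contains_iff, PySem.Set.mem_ofList] at hmem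
        obtain ⟨a, ha, heq⟩ := List.mem_map.mp hmem
        exact ⟨a, ha, Or.inl heq.symm⟩
      · obtain ⟨i, hi, rfl⟩ := (mem_enumerate_iff _ _ _).mp hp
        simp only [Bool.and_eq_true, beq_iff_eq] at hcond
        obtain ⟨hdot, hmem⟩ := hcond
        rw [PySem.Set.contains_iff, PySem.Set.mem_ofList] at hmem
        simp only [zero_add] at hmem hdot
        rw [drop_eq_slice] at hmem
        obtain ⟨a, ha, heq⟩ := List.mem_map.mp hmem
        refine ⟨a, ha, Or.inr ?_⟩
        rw [heq, dot_suffix_iff]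
        exact ⟨i, hi, hdot, heq ▸ rfl⟩
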